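-- pv_equiv track=rewrite | github.com/yeeun-uwu/BaekjoonRepo | 백준/Bronze/8958. OX퀴즈/OX퀴즈.py | calc
-- ===== SOURCE A (Python) =====
-- def calc(ans):
--     score = 0
--     streak = 1
--
--     for i in ans:
--         if i == "O":
--             score += streak
--             streak += 1
--         else:
--             streak = 1
--
--     return score
-- ===== SOURCE B (Python) =====
-- def calc(ans):
--     score = 0
--     i = 0
--     n = len(ans)
--     while i < n:
--         if ans[i] == "O":
--             j = i + 1
--             while j < n and ans[j] == "O":
--                 j += 1
--             k = j - i
--             score += k * (k + 1) // 2
--             i = j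
--         else:
--             i += 1
--     return score
-- ===== Notes on version B (the rewrite author's own statement) =====
-- stated objective: alternative
-- what changed: Replaces the per-character streak counter with a run-based scan: find each maximal run of the success character and add its triangular number k*(k+1)//2 in closed form.
import Mathlib
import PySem

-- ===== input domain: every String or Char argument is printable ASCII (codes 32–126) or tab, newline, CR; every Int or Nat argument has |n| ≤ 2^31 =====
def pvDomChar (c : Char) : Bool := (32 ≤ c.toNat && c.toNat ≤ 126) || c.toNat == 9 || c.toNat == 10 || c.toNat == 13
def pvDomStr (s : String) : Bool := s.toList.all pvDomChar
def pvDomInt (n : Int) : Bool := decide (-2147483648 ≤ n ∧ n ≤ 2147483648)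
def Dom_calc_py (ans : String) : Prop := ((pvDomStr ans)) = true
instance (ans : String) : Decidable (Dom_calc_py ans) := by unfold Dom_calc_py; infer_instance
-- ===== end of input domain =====

-- B replaces A's per-character streak counter with a run-based scan: each maximal
-- run of the success character contributes its triangular number k*(k+1)//2 in closed form (objective: alternative).

-- ===== PORT A =====
-- score = 0; streak = 1; for i in ans: if i == "O": score += streak; streak += 1 else: streak = 1
def calc_py (ans : String) : Int :=
  (ans.toList.foldl (fun (st : Int × Int) (i : Char) =>
      if i = 'O' then (st.1 + st.2, st.2 + 1) else (st.1, 1)) (0, 1)).1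

-- ===== PORT B =====
-- inner while of Source B: j counts forward while ans[j] == 'O'; this returns j - (i+1),
-- the number of leading 'O' characters of the remaining suffix
def calcAltRun : List Char → Nat
  | [] => 0
  | c :: t => if c = 'O' then calcAltRun t + 1 else 0

-- outer while of Source B on the suffix starting at index i: on an 'O', k = run length,
-- add k*(k+1)//2 (PySem floordiv = Python //) and jump to i = j; otherwise i += 1
def calcAltGo : List Char → Int
  | [] => 0
  | c :: t =>
      if c = 'O' then
        PySem.Int.floordiv (((calcAltRun t + 1) * (calcAltRun t + 2) : Nat) : Int) 2
          + calcAltGo (t.drop (calcAltRun t))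
      else calcAltGo t
termination_by l => l.length
decreasing_by all_goals simp

def calc_py_alt (ans : String) : Int := calcAltGo ans.toList

-- ===== PRECONDITION & SPEC =====
def Spec_calc_py (ans : String) (out : Int) : Prop := out = calc_py_alt ans
instance (ans : String) (out : Int) : Decidable (Spec_calc_py ans out) := by unfold Spec_calc_py; infer_instance

-- ===== CLAIM (what is proved, stated in full; the proofs are below) =====
def Claim_equal_calc_py : Prop := ∀ (ans : String), Dom_calc_py ans → Spec_calc_py ans (calc_py ans)

-- ===== LEMMAS AND PROOFS =====

-- the score A's loop still adds when the streak counter is k and the remaining input is l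
def pvG (k : Int) : List Char → Int
  | [] => 0
  | c :: t => if c = 'O' then k + pvG (k+1) t else pvG 1 t

-- k + (k+1) + … + (k+j-1), the contribution of a run of j 'O's entered with streak k
def pvT (k : Int) : Nat → Int
  | 0 => 0
  | j+1 => k + pvT (k+1) j

theorem pvFold (l : List Char) : ∀ s k : Int,
    (l.foldl (fun (st : Int × Int) (i : Char) =>
      if i = 'O' then (st.1 + st.2, st.2 + 1) else (st.1, 1)) (s, k)).1 = s + pvG k l := by
  induction l with
  | nil => intro s k; simp [pvG]
  | cons c t ih =>
      intro s k
      simp only [List.foldl_cons, pvG]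
      by_cases hc : c = 'O'
      · rw [if_pos hc, if_pos hc, ih]; ring
      · rw [if_neg hc, if_neg hc, ih]

theorem pvT_two (j : Nat) : ∀ k : Int, 2 * pvT k j = j * (2*k + j - 1) := by
  induction j with
  | zero => intro k; simp [pvT]
  | succ j ih =>
      intro k
      have h := ih (k+1)
      simp only [pvT]
      push_cast
      push_cast at h
      linear_combination h

theorem pvT_one (j : Nat) : pvT 1 j = ((j*(j+1)/2 : Nat) : Int) := by
  have h := pvT_two j 1
  have h2 : j*(j+1) % 2 = 0 := by
    rcases Nat.even_mul_succ_self j with ⟨m, hm⟩; omega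
  have h3 : ((j*(j+1) : Nat) : Int) = (j : Int) * (2*1 + j - 1) := by push_cast; ring
  have h4 : 2 * pvT 1 j = ((j*(j+1) : Nat) : Int) := by rw [h]; exact h3.symm
  generalize hm : j*(j+1) = m at h2 h4 ⊢
  omega

theorem pvAltGo_step (l : List Char) :
    calcAltGo l = pvT 1 (calcAltRun l) + calcAltGo (l.drop (calcAltRun l)) := by
  cases l with
  | nil => simp [calcAltGo.eq_1, calcAltRun, pvT]
  | cons c t =>
      by_cases hc : c = 'O'
      · have hd : PySem.Int.floordiv (((calcAltRun t + 1) * (calcAltRun t + 2) : Nat) : Int) 2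
            = (((calcAltRun t + 1) * (calcAltRun t + 2) / 2 : Nat) : Int) := by
          exact_mod_cast PySem.Int.floordiv_natCast ((calcAltRun t + 1) * (calcAltRun t + 2)) 2
        rw [calcAltGo.eq_2, if_pos hc, hd]
        simp only [calcAltRun, if_pos hc, pvT_one, List.drop_succ_cons]
      · rw [calcAltGo.eq_2, if_neg hc]
        simp only [calcAltRun, if_neg hc, pvT, List.drop_zero]
        rw [calcAltGo.eq_2, if_neg hc]
        omega

theorem pvG_eq (l : List Char) : ∀ k : Int,
    pvG k l = pvT k (calcAltRun l) + calcAltGo (l.drop (calcAltRun l)) := by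
  induction l with
  | nil => intro k; simp [pvG, calcAltRun, calcAltGo.eq_1, pvT]
  | cons c t ih =>
      intro k
      by_cases hc : c = 'O'
      · simp only [pvG, if_pos hc, calcAltRun, pvT, List.drop_succ_cons, ih (k+1)]
        ring
      · have hg : calcAltGo (c :: t) = calcAltGo t := by rw [calcAltGo.eq_2, if_neg hc]
        simp only [pvG, if_neg hc, calcAltRun, pvT, List.drop_zero, hg]
        rw [ih 1, ← pvAltGo_step t]
        omega

-- ===== VERDICT (by name: the statement is the Claim_ definition above) =====
theorem calc_py_spec : Claim_equal_calc_py := by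
  intro ans _
  unfold Spec_calc_py calc_py calc_py_alt
  rw [pvFold, pvG_eq, ← pvAltGo_step]
  ring
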